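-- pv_equiv track=rewrite | github.com/AndrewSushi/SpringBoard | 23-Python/data_structures/34_same_frequency/same_frequency.py | same_frequency
-- ===== SOURCE A (Python) =====
-- def same_frequency(num1, num2):
--     """Do these nums have same frequencies of digits?
--
--         >>> same_frequency(551122, 221515)
--         True
--
--         >>> same_frequency(321142, 3212215)
--         False
--
--         >>> same_frequency(1212, 2211)
--         True
--     """
--     hist1 = {}
--     hist2 = {}
--     num1, num2 = str(num1), str(num2)
--     if len(num1) != len(num2):
--         return False
--     for i in range(len(num1)):
--         if num1[i] in hist1:
--             hist1[num1[i]] += 1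
--         else:
--             hist1[num1[i]] = 1
--         if num2[i] in hist2:
--             hist2[num2[i]] += 1
--         else:
--             hist2[num2[i]] = 1
--     return hist1 == hist2
-- ===== SOURCE B (Python) =====
-- def same_frequency(num1, num2):
--     return sorted(str(num1)) == sorted(str(num2))
-- ===== Notes on version B (the rewrite author's own statement) =====
-- stated objective: simpler
-- what changed: Replaces the equal-length guard plus two hand-built digit histograms compared as dicts with a one-line sort-based canonical comparison: sorted(str(num1)) == sorted(str(num2)).
import Mathlib
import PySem

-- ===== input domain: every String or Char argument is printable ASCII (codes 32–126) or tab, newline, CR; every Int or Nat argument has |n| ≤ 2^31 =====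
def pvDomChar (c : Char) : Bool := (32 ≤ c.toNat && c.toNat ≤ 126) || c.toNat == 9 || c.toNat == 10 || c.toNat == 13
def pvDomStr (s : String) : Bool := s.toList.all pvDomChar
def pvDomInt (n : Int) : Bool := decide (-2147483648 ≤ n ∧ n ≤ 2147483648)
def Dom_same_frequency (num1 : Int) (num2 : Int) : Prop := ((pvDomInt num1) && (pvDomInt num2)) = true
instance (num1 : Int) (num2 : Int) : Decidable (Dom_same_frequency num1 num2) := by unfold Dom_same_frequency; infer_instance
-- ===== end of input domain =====

-- B replaces the length guard plus two index-loop digit histograms compared as Python dicts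
-- with a one-line sort-based canonical comparison (objective: simpler).


-- ===== PORT A =====
-- Python's `hist1 == hist2` on dicts ignores insertion order: equal key sets with equal values,
-- i.e. every key of either dict looks up to the same (present) value in both.
def pyDictEq (d1 d2 : PySem.Dict Char Int) : Bool :=
  d1.keys.all (fun k => d1.get? k == d2.get? k) && d2.keys.all (fun k => d1.get? k == d2.get? k)

-- one loop-body update `if c in hist: hist[c] += 1 else: hist[c] = 1`
def histStep (d : PySem.Dict Char Int) (c : Char) : PySem.Dict Char Int :=
  if d.contains c then d.insert c (d.getD c 0 + 1) else d.insert c 1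

def same_frequency (num1 : Int) (num2 : Int) : Bool :=
  let s1 := PySem.Int.toChars num1
  let s2 := PySem.Int.toChars num2
  if PySem.Chars.len s1 ≠ PySem.Chars.len s2 then false
  else
    let p := (PySem.List.pyRange 0 (PySem.List.len s1)).foldl
      (fun (p : PySem.Dict Char Int × PySem.Dict Char Int) i =>
        (histStep p.1 (PySem.List.pyGetD s1 i ' '), histStep p.2 (PySem.List.pyGetD s2 i ' ')))
      (PySem.Dict.empty, PySem.Dict.empty)
    pyDictEq p.1 p.2

-- ===== PORT B =====
def same_frequency_alt (num1 : Int) (num2 : Int) : Bool :=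
  (PySem.List.sorted (PySem.Int.toChars num1) (fun x => x)) ==
  (PySem.List.sorted (PySem.Int.toChars num2) (fun x => x))

-- ===== PRECONDITION & SPEC =====
def Spec_same_frequency (num1 : Int) (num2 : Int) (out : Bool) : Prop := out = same_frequency_alt num1 num2
instance (num1 : Int) (num2 : Int) (out : Bool) : Decidable (Spec_same_frequency num1 num2 out) := by unfold Spec_same_frequency; infer_instance

-- ===== CLAIM (what is proved, stated in full; the proofs are below) =====
def Claim_equal_same_frequency : Prop := ∀ (num1 : Int) (num2 : Int), Dom_same_frequency num1 num2 → Spec_same_frequency num1 num2 (same_frequency num1 num2)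

-- ===== LEMMAS AND PROOFS =====

theorem get?_counter (xs : List Char) (c : Char) :
    (PySem.Dict.counter xs).get? c = if c ∈ xs then some ((xs.count c : Int)) else none := by
  by_cases h : c ∈ xs
  · simp only [h, if_true]
    have hc : (PySem.Dict.counter xs).contains c = true := by
      rw [PySem.Dict.contains_counter]; simpa using h
    cases hg : (PySem.Dict.counter xs).get? c with
    | none => rw [PySem.Dict.get?_eq_none_iff_contains] at hg; rw [hc] at hg; cases hg
    | some v =>
        have := PySem.Dict.getD_counter xs c
        rw [PySem.Dict.getD_eq_get?_getD, hg] at this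
        simp at this; rw [this]
  · rw [if_neg h, PySem.Dict.get?_eq_none_iff_contains, PySem.Dict.contains_counter]
    simpa using h

theorem pyDictEq_counter (l1 l2 : List Char) :
    pyDictEq (PySem.Dict.counter l1) (PySem.Dict.counter l2) = true ↔ l1.Perm l2 := by
  unfold pyDictEq
  rw [List.perm_iff_count]
  simp only [Bool.and_eq_true, List.all_eq_true, PySem.Dict.keys_counter, beq_iff_eq,
    PySem.Set.mem_ofList, get?_counter]
  constructor
  · rintro ⟨h1, h2⟩ c
    by_cases hc1 : c ∈ l1
    · have := h1 c hc1
      by_cases hc2 : c ∈ l2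
      · simp [hc1, hc2] at this
        omega
      · simp [hc1, hc2] at this
    · by_cases hc2 : c ∈ l2
      · have := h2 c hc2
        simp [hc1, hc2] at this
      · simp [List.count_eq_zero_of_not_mem hc1, List.count_eq_zero_of_not_mem hc2]
  · intro h
    have mem : ∀ c, c ∈ l1 ↔ c ∈ l2 := by
      intro c
      rw [← List.count_pos_iff, ← List.count_pos_iff, h c]
    refine ⟨fun c hc => ?_, fun c hc => ?_⟩
    · simp [hc, (mem c).mp hc, h c]
    · simp [hc, (mem c).mpr hc, h c]

theorem foldl_histStep (s : List Char) :
    List.foldl histStep PySem.Dict.empty s = PySem.Dict.counter s := by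
  have hfun : histStep = (fun (d : PySem.Dict Char Int) c => d.insert c (d.getD c 0 + 1)) := by
    funext d c
    unfold histStep
    by_cases h : d.contains c
    · simp [h]
    · simp only [h]
      rw [PySem.Dict.getD_of_not_contains d 0 (by simpa using h)]
      simp
  rw [hfun, PySem.Dict.foldl_insert_getD_add_one_eq_counter]

theorem same_frequency_eq (num1 num2 : Int) :
    same_frequency num1 num2 = same_frequency_alt num1 num2 := by
  unfold same_frequency same_frequency_alt
  simp only [PySem.Chars.len_eq]
  by_cases hlen : (PySem.Int.toChars num1).length = (PySem.Int.toChars num2).length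
  · rw [if_neg (not_not_intro (by exact_mod_cast hlen))]
    rw [PySem.List.foldl_prod_mk
      (fun d i => histStep d (PySem.List.pyGetD (PySem.Int.toChars num1) i ' '))
      (fun d i => histStep d (PySem.List.pyGetD (PySem.Int.toChars num2) i ' '))]
    have fold1 : List.foldl (fun d i => histStep d (PySem.List.pyGetD (PySem.Int.toChars num1) i ' '))
        PySem.Dict.empty (PySem.List.pyRange 0 (PySem.List.len (PySem.Int.toChars num1)))
        = PySem.Dict.counter (PySem.Int.toChars num1) := by
      rw [PySem.List.foldl_pyRange_pyGetD _ ' ' histStep _ le_rfl]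
      simpa using foldl_histStep (PySem.Int.toChars num1)
    have fold2 : List.foldl (fun d i => histStep d (PySem.List.pyGetD (PySem.Int.toChars num2) i ' '))
        PySem.Dict.empty (PySem.List.pyRange 0 (PySem.List.len (PySem.Int.toChars num1)))
        = PySem.Dict.counter (PySem.Int.toChars num2) := by
      have hlen' : PySem.List.len (PySem.Int.toChars num1) = PySem.List.len (PySem.Int.toChars num2) := by
        simp [PySem.List.len, hlen]
      rw [hlen', PySem.List.foldl_pyRange_pyGetD _ ' ' histStep _ le_rfl]
      simpa using foldl_histStep (PySem.Int.toChars num2)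
    simp only [fold1, fold2]
    rw [Bool.eq_iff_iff, pyDictEq_counter, beq_iff_eq,
      PySem.List.sorted_id_eq_sorted_id_iff_perm]
  · rw [if_pos (by exact_mod_cast hlen)]
    symm
    rw [beq_eq_false_iff_ne]
    intro hs
    have := congrArg List.length hs
    simp only [PySem.List.length_sorted] at this
    exact hlen this

-- ===== VERDICT (by name: the statement is the Claim_ definition above) =====
theorem same_frequency_spec : Claim_equal_same_frequency := by
  intro num1 num2 _
  unfold Spec_same_frequency
  exact same_frequency_eq num1 num2
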